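-- pv_equiv track=rewrite | github.com/LucasErcolano/parameter-golf | run_checks.py | extract_losses
-- ===== SOURCE A (Python) =====
-- def extract_losses(out):
--     losses = []
--     for line in out.splitlines():
--         if "train_loss:" in line:
--             parts = line.split()
--             for p in parts:
--                 if p.startswith("train_loss:"):
--                     losses.append(p.split(":")[1])
--     return losses
-- ===== SOURCE B (Python) =====
-- def extract_losses(out):
--     # One flat pass: whitespace-splitting the whole text yields exactly the
--     # tokens A sees line by line (line breaks are whitespace), so no line loop
--     # or substring membership test is needed.
--     return [t[len("train_loss:"):].split(":")[0]
--             for t in out.split()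
--             if t.startswith("train_loss:")]
-- ===== Notes on version B (the rewrite author's own statement) =====
-- stated objective: simpler
-- what changed: Replaced the nested line loop (splitlines, a substring membership test, a per-line whitespace split, and indexing the colon-split of each token) by a single flat comprehension over the whitespace-split of the whole text, slicing off the fixed prefix and taking the field before the next colon.
import Mathlib
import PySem

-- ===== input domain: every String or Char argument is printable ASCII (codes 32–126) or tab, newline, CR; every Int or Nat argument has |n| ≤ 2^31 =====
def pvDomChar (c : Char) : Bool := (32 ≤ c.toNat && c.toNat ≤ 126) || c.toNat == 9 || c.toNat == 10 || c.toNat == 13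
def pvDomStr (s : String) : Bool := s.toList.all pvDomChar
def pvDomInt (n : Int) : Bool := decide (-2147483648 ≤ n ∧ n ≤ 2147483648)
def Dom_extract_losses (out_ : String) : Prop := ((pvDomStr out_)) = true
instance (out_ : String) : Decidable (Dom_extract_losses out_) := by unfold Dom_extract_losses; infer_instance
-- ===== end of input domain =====

-- B replaces A's nested line loop (splitlines + membership test + per-line split)
-- by one flat comprehension over the whitespace-split of the whole text (simpler).

-- ===== PORT A =====
def extract_losses (out_ : String) : List String :=
  (PySem.Str.splitlines out_).foldl (fun losses line =>
    if PySem.Str.isIn "train_loss:" line = true then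
      (PySem.Str.split₀ line).foldl (fun losses p =>
        if PySem.Str.startswith p "train_loss:" = true then
          losses ++ [(PySem.List.pyGet? ((PySem.Str.split? p ":").getD []) 1).getD ""]
        else losses) losses
    else losses) []

-- ===== PORT B =====
def extract_losses_alt (out_ : String) : List String :=
  ((PySem.Str.split₀ out_).filter (fun t => PySem.Str.startswith t "train_loss:")).map
    (fun t => (PySem.List.pyGet?
        ((PySem.Str.split? (PySem.Str.slice t (some (PySem.Str.len "train_loss:")) none) ":").getD [])
        0).getD "")

-- ===== PRECONDITION & SPEC =====
def Spec_extract_losses (out_ : String) (out : List String) : Prop := out = extract_losses_alt out_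
instance (out_ : String) (out : List String) : Decidable (Spec_extract_losses out_ out) := by unfold Spec_extract_losses; infer_instance

-- ===== CLAIM (what is proved, stated in full; the proofs are below) =====
def Claim_equal_extract_losses : Prop := ∀ (out_ : String), Dom_extract_losses out_ → Spec_extract_losses out_ (extract_losses out_)

-- ===== LEMMAS AND PROOFS =====

-- accumulator pull-out for split₀.go
theorem sgo_acc (s : List Char) (cur : List Char) (acc : List (List Char)) :
    PySem.Chars.split₀.go s cur acc = acc.reverse ++ PySem.Chars.split₀.go s cur [] := by
  induction s generalizing cur acc with
  | nil => simp [PySem.Chars.split₀.go]; split_ifs <;> simp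
  | cons c rest ih =>
    simp only [PySem.Chars.split₀.go]
    split_ifs with h1 h2
    · exact ih [] acc
    · rw [ih [] (cur.reverse :: acc), ih [] [cur.reverse]]; simp
    · exact ih (c :: cur) acc

-- split₀ distributes over a whitespace character
theorem sgo_ws_append (c : Char) (hc : PySem.Chars.isspace c = true) (t s cur : List Char) :
    PySem.Chars.split₀.go (s ++ c :: t) cur [] =
      PySem.Chars.split₀.go s cur [] ++ PySem.Chars.split₀.go t [] [] := by
  induction s generalizing cur with
  | nil =>
    simp only [List.nil_append, PySem.Chars.split₀.go, hc, if_pos]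
    split_ifs with h
    · simp
    · rw [sgo_acc t [] [cur.reverse]]
  | cons d s' ih =>
    simp only [List.cons_append, PySem.Chars.split₀.go]
    split_ifs with h1 h2
    · exact ih []
    · rw [sgo_acc (s' ++ c :: t) [] [cur.reverse], sgo_acc s' [] [cur.reverse], ih []]; simp
    · exact ih (d :: cur)

theorem split₀_ws_append (c : Char) (hc : PySem.Chars.isspace c = true) (s t : List Char) :
    PySem.Chars.split₀ (s ++ c :: t) = PySem.Chars.split₀ s ++ PySem.Chars.split₀ t :=
  sgo_ws_append c hc t s []

-- every token of split₀ is an infix of the input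
theorem sgo_mem (p : List Char) (s cur : List Char) (acc : List (List Char))
    (hp : p ∈ PySem.Chars.split₀.go s cur acc) : p ∈ acc ∨ p <:+: (cur.reverse ++ s) := by
  induction s generalizing cur acc with
  | nil =>
    unfold PySem.Chars.split₀.go at hp
    split_ifs at hp <;> simp at hp
    · exact Or.inl hp
    · rcases hp with h | h
      · exact Or.inl h
      · exact Or.inr (h ▸ ⟨[], [], by simp⟩)
  | cons c rest ih =>
    unfold PySem.Chars.split₀.go at hp
    split_ifs at hp with h1 h2
    · rcases ih [] acc hp with h | h
      · exact Or.inl h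
      · exact Or.inr (h.trans (((List.suffix_cons c rest).trans (List.suffix_append _ _)).isInfix))
    · rcases ih [] (cur.reverse :: acc) hp with h | h
      · rcases List.mem_cons.mp h with h' | h'
        · exact Or.inr (h' ▸ ⟨[], c :: rest, by simp⟩)
        · exact Or.inl h'
      · exact Or.inr (h.trans (((List.suffix_cons c rest).trans (List.suffix_append _ _)).isInfix))
    · rcases ih (c :: cur) acc hp with h | h
      · exact Or.inl h
      · exact Or.inr (by simpa using h)

theorem mem_split₀_infix (s p : List Char) (hp : p ∈ PySem.Chars.split₀ s) : p <:+: s := by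
  rcases sgo_mem p s [] [] hp with h | h
  · simp at h
  · simpa using h

-- accumulator pull-out for splitlines.go (by induction on a length bound)
theorem lgo_acc' (isB : Char → Bool) (n : Nat) :
    ∀ s cur acc, s.length ≤ n → PySem.Chars.splitlines.go isB s cur acc =
      acc.reverse ++ PySem.Chars.splitlines.go isB s cur [] := by
  induction n with
  | zero =>
    intro s cur acc hs
    have : s = [] := by cases s <;> simp_all
    subst this
    rw [PySem.Chars.splitlines.go.eq_def, PySem.Chars.splitlines.go.eq_def]
    simp; split_ifs <;> simp
  | succ n ih =>
    intro s cur acc hs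
    rw [PySem.Chars.splitlines.go.eq_def]
    conv_rhs => rw [PySem.Chars.splitlines.go.eq_def]
    split
    · split_ifs <;> simp
    · rename_i rest
      rw [ih rest [] (cur.reverse :: acc) (by simp at hs; omega),
          ih rest [] [cur.reverse] (by simp at hs; omega)]
      simp
    · rename_i c rest _
      split_ifs with h
      · rw [ih rest [] (cur.reverse :: acc) (by simp at hs; omega),
            ih rest [] [cur.reverse] (by simp at hs; omega)]
        simp
      · exact ih rest (c :: cur) acc (by simp at hs; omega)

-- line-break characters inside the domain are whitespace
theorem dom_break_isspace (c : Char) (h : c.toNat = 10 ∨ c.toNat = 13) :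
    PySem.Chars.isspace c = true := by
  simp [PySem.Chars.isspace]; omega

-- step equations for splitlines.go
theorem lgo_crlf (isB : Char → Bool) (rest cur : List Char) (acc : List (List Char)) :
    PySem.Chars.splitlines.go isB ('\r' :: '\n' :: rest) cur acc =
      PySem.Chars.splitlines.go isB rest [] (cur.reverse :: acc) := by
  rw [PySem.Chars.splitlines.go.eq_def]
  rfl

theorem lgo_cons (isB : Char → Bool) (c : Char) (rest cur : List Char) (acc : List (List Char))
    (hnot : ¬(c = '\r' ∧ rest.head? = some '\n')) :
    PySem.Chars.splitlines.go isB (c :: rest) cur acc =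
      if isB c = true then PySem.Chars.splitlines.go isB rest [] (cur.reverse :: acc)
      else PySem.Chars.splitlines.go isB rest (c :: cur) acc := by
  rw [PySem.Chars.splitlines.go.eq_def]
  split
  · rename_i heq; cases heq
  · rename_i heq
    injection heq with h1 h2; subst h1
    exact absurd ⟨rfl, by rw [h2]; rfl⟩ hnot
  · rename_i heq
    injection heq with h1 h2
    subst h1; subst h2
    rfl

-- generalized main lemma: whitespace-splitting with a pending (break-free) line prefix
theorem lgo_split (isB : Char → Bool)
    (hB : ∀ c, pvDomChar c = true → (isB c = true ↔ (c.toNat = 10 ∨ c.toNat = 13)))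
    (n : Nat) :
    ∀ s cur, s.length ≤ n → (∀ c ∈ s, pvDomChar c = true) →
      PySem.Chars.split₀ (cur.reverse ++ s) =
        (PySem.Chars.splitlines.go isB s cur []).flatMap PySem.Chars.split₀ := by
  induction n with
  | zero =>
    intro s cur hs _
    have : s = [] := by cases s <;> simp_all
    subst this
    rw [PySem.Chars.splitlines.go.eq_def]
    simp; split_ifs with h
    · simp_all
      decide
    · simp
  | succ n ih =>
    intro s cur hs hdom
    match s with
    | [] =>
      rw [PySem.Chars.splitlines.go.eq_def]
      simp; split_ifs with h
      · simp_all
        decide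
      · simp
    | c :: rest =>
      by_cases hcr : c = '\r' ∧ rest.head? = some '\n'
      · obtain ⟨hc, hh⟩ := hcr
        subst hc
        cases rest with
        | nil => simp at hh
        | cons h0 rest' =>
          have : h0 = '\n' := by simpa using hh
          subst this
          rw [lgo_crlf, lgo_acc' isB (n + 1) rest' [] [cur.reverse] (by simp at hs; omega)]
          rw [show cur.reverse ++ '\r' :: '\n' :: rest' = cur.reverse ++ '\r' :: ('\n' :: rest') from rfl]
          rw [split₀_ws_append '\r' (by decide) cur.reverse ('\n' :: rest')]
          rw [show ('\n' :: rest') = [] ++ '\n' :: rest' from rfl]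
          rw [split₀_ws_append '\n' (by decide) [] rest']
          have hrec := ih rest' [] (by simp at hs; omega) (fun d hd => hdom d (by simp [hd]))
          simp only [List.reverse_nil, List.nil_append] at hrec
          rw [hrec]
          simp [PySem.Chars.split₀, PySem.Chars.split₀.go]
      · rw [lgo_cons isB c rest cur [] hcr]
        split_ifs with h
        · have hc : c.toNat = 10 ∨ c.toNat = 13 :=
            (hB c (hdom c (by simp))).mp h
          rw [lgo_acc' isB (n + 1) rest [] [cur.reverse] (by simp at hs; omega)]
          rw [split₀_ws_append c (dom_break_isspace c hc) cur.reverse rest]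
          have hrec := ih rest [] (by simp at hs; omega) (fun d hd => hdom d (by simp [hd]))
          simp only [List.reverse_nil, List.nil_append] at hrec
          rw [hrec]
          simp
        · have heq : cur.reverse ++ c :: rest = (c :: cur).reverse ++ rest := by simp
          rw [heq, ih rest (c :: cur) (by simp at hs; omega) (fun d hd => hdom d (by simp [hd]))]

-- under the printable-ASCII(+tab/LF/CR) domain, whitespace-splitting the whole text
-- equals whitespace-splitting every line of splitlines
theorem split₀_flatMap_splitlines (s : List Char) (hs : ∀ c ∈ s, pvDomChar c = true) :
    PySem.Chars.split₀ s = (PySem.Chars.splitlines s).flatMap PySem.Chars.split₀ := by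
  have := lgo_split (isB := fun c =>
      decide (c.toNat = 10) || decide (c.toNat = 13) || decide (c.toNat = 11) || decide (c.toNat = 12) ||
      decide (c.toNat = 28) || decide (c.toNat = 29) || decide (c.toNat = 30) || decide (c.toNat = 133) ||
      decide (c.toNat = 8232) || decide (c.toNat = 8233))
    (by intro c hc; simp [pvDomChar] at hc ⊢; omega) s.length s [] le_rfl hs
  simpa [PySem.Chars.splitlines] using this

-- step equations for splitOn.go
theorem ogo_zero (sep l cur : List Char) (acc : List (List Char)) :
    PySem.Chars.splitOn.go sep 0 l cur acc = ((cur.reverse ++ l) :: acc).reverse := by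
  rw [PySem.Chars.splitOn.go.eq_def]

theorem ogo_nil (sep cur : List Char) (n : Nat) (acc : List (List Char)) :
    PySem.Chars.splitOn.go sep (n + 1) [] cur acc = (cur.reverse :: acc).reverse := by
  rw [PySem.Chars.splitOn.go.eq_def]

theorem ogo_cons (sep : List Char) (n : Nat) (c : Char) (rest cur : List Char) (acc : List (List Char)) :
    PySem.Chars.splitOn.go sep (n + 1) (c :: rest) cur acc =
      if sep.isPrefixOf (c :: rest) = true then
        PySem.Chars.splitOn.go sep n (List.drop sep.length (c :: rest)) [] (cur.reverse :: acc)
      else PySem.Chars.splitOn.go sep n rest (c :: cur) acc := by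
  rw [PySem.Chars.splitOn.go.eq_def]

-- accumulator pull-out for splitOn.go
theorem ogo_acc (sep : List Char) (fuel : Nat) :
    ∀ (l cur : List Char) (acc : List (List Char)),
    PySem.Chars.splitOn.go sep fuel l cur acc = acc.reverse ++ PySem.Chars.splitOn.go sep fuel l cur [] := by
  induction fuel with
  | zero => intro l cur acc; rw [ogo_zero, ogo_zero]; simp
  | succ n ih =>
    intro l cur acc
    cases l with
    | nil => rw [ogo_nil, ogo_nil]; simp
    | cons c rest =>
      rw [ogo_cons, ogo_cons]
      split_ifs with h
      · rw [ih _ [] (cur.reverse :: acc), ih _ [] [cur.reverse]]; simp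
      · exact ih rest (c :: cur) acc

-- head structure of a single-character split
theorem ogo_head (fuel : Nat) (r cur : List Char) (h : r.length ≤ fuel) :
    ∃ rest, PySem.Chars.splitOn.go [':'] fuel r cur [] =
      (cur.reverse ++ r.takeWhile (fun c => c ≠ ':')) :: rest := by
  induction fuel generalizing r cur with
  | zero =>
    have : r = [] := by cases r <;> simp_all
    subst this
    exact ⟨[], by rw [ogo_zero]; simp⟩
  | succ n ih =>
    cases r with
    | nil => exact ⟨[], by rw [ogo_nil]; simp⟩
    | cons c rest =>
      rw [ogo_cons]
      by_cases hc : c = ':'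
      · subst hc
        rw [if_pos (by simp [List.isPrefixOf])]
        rw [ogo_acc]
        exact ⟨PySem.Chars.splitOn.go [':'] n rest [] [], by simp [List.takeWhile]⟩
      · rw [if_neg (by simp [List.isPrefixOf]; exact fun hh => hc hh.symm)]
        obtain ⟨tail, htail⟩ := ih rest (c :: cur) (by simp at h; omega)
        exact ⟨tail, by rw [htail]; simp [List.takeWhile, hc]⟩

-- consuming a colon-free prefix then the first colon
theorem ogo_prefix (a : List Char) (ha : ∀ c ∈ a, c ≠ ':') (fuel : Nat) (r cur : List Char)
    (h : a.length + r.length + 1 ≤ fuel) :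
    ∃ rest, PySem.Chars.splitOn.go [':'] fuel (a ++ ':' :: r) cur [] =
      (cur.reverse ++ a) :: (r.takeWhile (fun c => c ≠ ':')) :: rest := by
  induction a generalizing fuel cur with
  | nil =>
    obtain ⟨n, rfl⟩ : ∃ n, fuel = n + 1 := ⟨fuel - 1, by omega⟩
    rw [List.nil_append, ogo_cons, if_pos (by simp [List.isPrefixOf])]
    rw [ogo_acc]
    obtain ⟨tail, htail⟩ := ogo_head n r [] (by simp at h; omega)
    refine ⟨tail, ?_⟩
    have hdrop : List.drop [':'].length (':' :: r) = r := rfl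
    rw [hdrop, htail]; simp
  | cons d a' ih =>
    obtain ⟨n, rfl⟩ : ∃ n, fuel = n + 1 := ⟨fuel - 1, by omega⟩
    have hd : d ≠ ':' := ha d (by simp)
    rw [List.cons_append, ogo_cons, if_neg (by simp [List.isPrefixOf]; exact fun hh => hd hh.symm)]
    obtain ⟨tail, htail⟩ := ih (fun c hc => ha c (by simp [hc])) n (d :: cur) (by simp at h ⊢; omega)
    exact ⟨tail, by rw [htail]; simp⟩

-- foldl with a guarded append is a flatMap
theorem foldl_if_append {α β : Type} (p : α → Bool) (g : α → List β) (l : List α) (acc : List β) :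
    l.foldl (fun acc x => if p x = true then acc ++ g x else acc) acc
      = acc ++ l.flatMap (fun x => if p x = true then g x else []) := by
  induction l generalizing acc with
  | nil => simp
  | cons x xs ih =>
    simp only [List.foldl_cons, List.flatMap_cons]
    split_ifs <;> simp [ih]

-- String-level version of the main lemma
theorem str_split₀_flatMap (out_ : String) (hdom : Dom_extract_losses out_) :
    PySem.Str.split₀ out_ = (PySem.Str.splitlines out_).flatMap PySem.Str.split₀ := by
  have h := split₀_flatMap_splitlines out_.toList (by
    unfold Dom_extract_losses pvDomStr at hdom
    simpa [List.all_eq_true] using hdom)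
  simp [PySem.Str.split₀, PySem.Str.splitlines, h, List.map_flatMap, List.flatMap_map,
    String.toList_ofList]

-- a line with no occurrence of the prefix has no token starting with it
theorem filter_startswith_nil (line : String)
    (h : PySem.Str.isIn "train_loss:" line = false) :
    (PySem.Str.split₀ line).filter (fun t => PySem.Str.startswith t "train_loss:") = [] := by
  rw [List.filter_eq_nil_iff]
  intro t ht
  simp only [PySem.Str.split₀, List.mem_map] at ht
  obtain ⟨cs, hcs, rfl⟩ := ht
  simp only [PySem.Str.startswith_eq, String.toList_ofList, Bool.not_eq_true]
  rw [PySem.Str.isIn_eq, PySem.Chars.isIn_eq_false_iff] at h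
  cases hsw : PySem.Chars.startswith cs "train_loss:".toList
  · rfl
  · exact absurd (((PySem.Chars.startswith_iff cs _).mp hsw).isInfix.trans
      (mem_split₀_infix _ _ hcs)) h

-- the two extraction expressions agree on tokens that start with the prefix
set_option maxRecDepth 4096 in
theorem extract_token_eq (t : String)
    (hP : PySem.Str.startswith t "train_loss:" = true) :
    (PySem.List.pyGet? ((PySem.Str.split? t ":").getD []) 1).getD "" =
    (PySem.List.pyGet? ((PySem.Str.split? (PySem.Str.slice t
        (some (PySem.Str.len "train_loss:")) none) ":").getD []) 0).getD "" := by
  rw [PySem.Str.startswith_eq, PySem.Chars.startswith_iff] at hP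
  obtain ⟨r, hr⟩ := hP
  have ha : ∀ c ∈ "train_loss".toList, c ≠ ':' := by simp
  have hsplit : t.toList = "train_loss".toList ++ ':' :: r := by
    rw [← hr, show ("train_loss:".toList) = "train_loss".toList ++ [':'] from by decide,
        List.append_assoc]
    rfl
  -- A's side: element 1 of t.split(":")
  obtain ⟨tail, htail⟩ := ogo_prefix "train_loss".toList ha
    (("train_loss".toList ++ ':' :: r).length + 1) r [] (by simp; omega)
  have hA : (PySem.Str.split? t ":").getD [] =
      List.map String.ofList (("train_loss".toList) :: (r.takeWhile (fun c => c ≠ ':')) :: tail) := by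
    simp only [PySem.Str.split?, PySem.Chars.split?, PySem.Chars.splitOn,
      show (":".toList) = [':'] from by decide]
    rw [if_neg (by decide)]
    rw [hsplit, htail]
    simp
  -- B's side: element 0 of t[11:].split(":")
  have hslice : (PySem.Str.slice t (some (PySem.Str.len "train_loss:")) none).toList = r := by
    rw [PySem.Str.toList_slice]
    simp only [PySem.Chars.slice_eq_listSlice]
    rw [show PySem.Str.len "train_loss:" = (11 : Int) from by decide]
    rw [PySem.List.slice_from t.toList (by norm_num)]
    rw [hsplit]
    rfl
  obtain ⟨tail', htail'⟩ := ogo_head (r.length + 1) r [] (by omega)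
  have hB : (PySem.Str.split? (PySem.Str.slice t (some (PySem.Str.len "train_loss:")) none) ":").getD [] =
      List.map String.ofList ((r.takeWhile (fun c => c ≠ ':')) :: tail') := by
    simp only [PySem.Str.split?, PySem.Chars.split?, PySem.Chars.splitOn,
      show (":".toList) = [':'] from by decide]
    rw [if_neg (by decide)]
    rw [hslice, htail']
    simp
  rw [hA, hB]
  rw [show (1 : Int) = ((1 : Nat) : Int) from rfl, PySem.List.pyGet?_natCast]
  rw [show (0 : Int) = ((0 : Nat) : Int) from rfl, PySem.List.pyGet?_natCast]
  simp

theorem extract_losses_spec : Claim_equal_extract_losses := by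
  intro out_ hdom
  unfold Spec_extract_losses extract_losses extract_losses_alt
  -- inner loop → map/filter
  have hinner : ∀ (losses : List String) (line : String),
      (PySem.Str.split₀ line).foldl (fun losses p =>
        if PySem.Str.startswith p "train_loss:" = true then
          losses ++ [(PySem.List.pyGet? ((PySem.Str.split? p ":").getD []) 1).getD ""]
        else losses) losses
      = losses ++ ((PySem.Str.split₀ line).filter (fun t => PySem.Str.startswith t "train_loss:")).map
          (fun p => (PySem.List.pyGet? ((PySem.Str.split? p ":").getD []) 1).getD "") :=
    fun losses line => PySem.List.foldl_append_if _ _ _ _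
  simp only [hinner]
  -- outer loop → flatMap, and the membership guard is redundant
  rw [foldl_if_append (fun line => PySem.Str.isIn "train_loss:" line)
      (fun line => ((PySem.Str.split₀ line).filter (fun t => PySem.Str.startswith t "train_loss:")).map
        (fun p => (PySem.List.pyGet? ((PySem.Str.split? p ":").getD []) 1).getD ""))]
  have hdrop : ∀ line : String,
      (if PySem.Str.isIn "train_loss:" line = true then
        ((PySem.Str.split₀ line).filter (fun t => PySem.Str.startswith t "train_loss:")).map
          (fun p => (PySem.List.pyGet? ((PySem.Str.split? p ":").getD []) 1).getD "")
      else []) = ((PySem.Str.split₀ line).filter (fun t => PySem.Str.startswith t "train_loss:")).map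
          (fun p => (PySem.List.pyGet? ((PySem.Str.split? p ":").getD []) 1).getD "") := by
    intro line
    by_cases h : PySem.Str.isIn "train_loss:" line = true
    · rw [if_pos h]
    · rw [if_neg h, filter_startswith_nil line (by simpa using h)]
      simp
  simp only [hdrop, List.nil_append]
  rw [← List.map_flatMap, ← List.filter_flatMap, ← str_split₀_flatMap out_ hdom]
  exact List.map_congr_left (fun t ht =>
    extract_token_eq t (List.mem_filter.mp ht).2)
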